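-- pv_equiv track=rewrite | github.com/EaW-Team/equestria_dev | interface/hoi4IdeaGFXEntryApp.py | find_index_before_bracket
-- ===== SOURCE A (Python) =====
-- def find_index_before_bracket(lines):
--     after_bracket = False
--     index_to_insert = 0
--     for i, line in reversed(list(enumerate(lines))):
--         if "}" in line:
--             after_bracket = True
--             index_to_insert = i
--             break
--     return index_to_insert
-- ===== SOURCE B (Python) =====
-- def find_index_before_bracket(lines):
--     indices = [i for i, line in enumerate(lines) if "}" in line]
--     return indices[-1] if indices else 0
-- ===== Notes on version B (the rewrite author's own statement) =====
-- stated objective: simpler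
-- what changed: Replaces the reverse scan with break by a forward comprehension gathering all indices whose line contains '}' and selecting the last one (0 if none).
import Mathlib
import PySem

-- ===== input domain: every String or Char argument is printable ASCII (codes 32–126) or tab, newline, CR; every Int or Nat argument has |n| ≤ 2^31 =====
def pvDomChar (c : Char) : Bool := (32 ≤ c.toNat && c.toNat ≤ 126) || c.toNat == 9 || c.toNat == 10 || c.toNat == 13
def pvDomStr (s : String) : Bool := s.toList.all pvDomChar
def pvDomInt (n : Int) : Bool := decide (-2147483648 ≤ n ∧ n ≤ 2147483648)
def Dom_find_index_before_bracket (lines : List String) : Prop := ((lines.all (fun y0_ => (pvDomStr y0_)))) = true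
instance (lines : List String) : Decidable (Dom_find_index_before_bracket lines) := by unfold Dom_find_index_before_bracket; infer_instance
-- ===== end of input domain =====

-- B replaces A's reverse scan with break by one forward pass collecting all matching indices and taking the last (simpler decomposition; return value only).

-- ===== PORT A =====
-- reversed(list(enumerate(lines))) scan with break: first (from the back) i with "}" in line, else 0
def pvGoA : List (Int × String) → Int
  | [] => 0
  | (i, line) :: rest => if PySem.Str.isIn "}" line then i else pvGoA rest

def find_index_before_bracket (lines : List String) : Int :=
  pvGoA (PySem.List.enumerate lines 0).reverse

-- ===== PORT B =====
def find_index_before_bracket_alt (lines : List String) : Int :=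
  let indices := ((PySem.List.enumerate lines 0).filter (fun p => PySem.Str.isIn "}" p.2)).map (·.1)
  match indices.getLast? with
  | some i => i
  | none => 0

-- ===== PRECONDITION & SPEC =====
def Spec_find_index_before_bracket (lines : List String) (out : Int) : Prop := out = find_index_before_bracket_alt lines
instance (lines : List String) (out : Int) : Decidable (Spec_find_index_before_bracket lines out) := by unfold Spec_find_index_before_bracket; infer_instance

-- ===== CLAIM (what is proved, stated in full; the proofs are below) =====
def Claim_equal_find_index_before_bracket : Prop := ∀ (lines : List String), Dom_find_index_before_bracket lines → Spec_find_index_before_bracket lines (find_index_before_bracket lines)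

-- ===== LEMMAS AND PROOFS =====

-- ===== VERDICT (by name: the statement is the Claim_ definition above) =====
-- pvGoA is head-of-filter
theorem pvGoA_eq_head (l : List (Int × String)) :
    pvGoA l = ((l.filter (fun p => PySem.Str.isIn "}" p.2)).map (·.1)).head?.getD 0 := by
  induction l with
  | nil => rfl
  | cons x t ih =>
    obtain ⟨i, line⟩ := x
    simp only [pvGoA, PySem.Str.isIn, List.filter_cons] at *
    by_cases h : PySem.Chars.isIn ['}'] line.toList = true
    · simp [h]
    · simp [h, ih]

theorem find_index_before_bracket_spec : Claim_equal_find_index_before_bracket := by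
  intro lines _
  unfold Spec_find_index_before_bracket find_index_before_bracket find_index_before_bracket_alt
  rw [pvGoA_eq_head]
  simp only [List.filter_reverse, List.map_reverse, List.head?_reverse]
  cases h : ((((PySem.List.enumerate lines 0).filter (fun p => PySem.Str.isIn "}" p.2)).map (·.1)).getLast?) <;> simp only [Option.getD_some, Option.getD_none]
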